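-- pv_equiv track=rewrite | github.com/DaryTori/Borovkova_Python2 | PZ/PZ-7/Pz_7_p2.py | check_alphabetical_order
-- ===== SOURCE A (Python) =====
-- def check_alphabetical_order(input_string):
--     prev_char = ''
--     count = 0
--     for char in input_string:
--         count += 1
--         if 'a' <= char <= 'z':
--             if prev_char != '' and char < prev_char:
--                 return count
--             prev_char = char
--     return 0
-- ===== SOURCE B (Python) =====
-- def check_alphabetical_order(input_string):
--     # pass 1: for each position, the maximum lowercase letter occurring strictly before it ('' = none yet)
--     prefix_max = []
--     m = ''
--     for ch in input_string:
--         prefix_max.append(m)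
--         if 'a' <= ch <= 'z' and ch > m:
--             m = ch
--     # pass 2: first lowercase char strictly below the prefix maximum breaks the order
--     for i, ch in enumerate(input_string):
--         if 'a' <= ch <= 'z' and ch < prefix_max[i]:
--             return i + 1
--     return 0
-- ===== Notes on version B (the rewrite author's own statement) =====
-- stated objective: alternative
-- what changed: B replaces A's previous-letter comparison by a two-stage prefix-maximum algorithm: a first pass precomputes for every position the maximum lowercase letter seen strictly before it, and a second pass returns 1 + the first position whose lowercase char is below that prefix maximum (0 if none); this agrees with A because up to the first inversion the filtered sequence is nondecreasing, so the prefix max equals the previous letter.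
import Mathlib
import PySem

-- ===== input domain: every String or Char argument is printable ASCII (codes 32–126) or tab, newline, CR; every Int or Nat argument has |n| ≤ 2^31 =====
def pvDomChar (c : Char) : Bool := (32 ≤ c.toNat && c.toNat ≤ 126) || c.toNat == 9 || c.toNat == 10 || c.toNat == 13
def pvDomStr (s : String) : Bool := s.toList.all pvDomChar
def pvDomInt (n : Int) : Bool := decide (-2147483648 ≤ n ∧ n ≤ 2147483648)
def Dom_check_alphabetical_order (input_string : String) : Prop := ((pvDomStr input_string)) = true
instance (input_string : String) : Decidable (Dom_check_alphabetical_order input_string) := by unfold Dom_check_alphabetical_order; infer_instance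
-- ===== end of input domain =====

-- B: two staged passes (prefix-maximum table, then first char below its prefix max) instead of A's single previous-letter loop; alternative algorithm, same cost; proof: before the first inversion the prefix max equals the previous letter.


-- ===== PORT A =====
-- A's loop: running count over all characters, prev_char as Option Char ('' = none)
def pvGoA : List Char → Option Char → Int → Int
  | [], _, _ => 0
  | c :: rest, prev, count =>
    if 'a' ≤ c ∧ c ≤ 'z' then
      match prev with
      | some p => if c < p then count + 1 else pvGoA rest (some c) (count + 1)
      | none => pvGoA rest (some c) (count + 1)
    else pvGoA rest prev (count + 1)

def check_alphabetical_order (input_string : String) : Int :=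
  pvGoA input_string.toList none 0

-- ===== PORT B =====
-- pass 1 of Source B: prefix_max table; '' sentinel = none (every letter compares above it)
def pvPrefixMax : List Char → Option Char → List (Option Char)
  | [], _ => []
  | c :: rest, none =>
    none :: pvPrefixMax rest (if 'a' ≤ c ∧ c ≤ 'z' then some c else none)
  | c :: rest, some p =>
    some p :: pvPrefixMax rest (if ('a' ≤ c ∧ c ≤ 'z') ∧ p < c then some c else some p)

-- pass 2 of Source B: the chars walked in step with prefix_max (maxes[i] for the i-th char);
-- ch < '' is never true, so the none case never fires
def pvScanB : List Char → List (Option Char) → Int → Int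
  | c :: rest, some p :: mrest, i =>
    if ('a' ≤ c ∧ c ≤ 'z') ∧ c < p then i + 1 else pvScanB rest mrest (i + 1)
  | _ :: rest, none :: mrest, i => pvScanB rest mrest (i + 1)  -- ch < '' is always False in Python
  | _, _, _ => 0

def check_alphabetical_order_alt (input_string : String) : Int :=
  pvScanB input_string.toList (pvPrefixMax input_string.toList none) 0

-- ===== PRECONDITION & SPEC =====
def Spec_check_alphabetical_order (input_string : String) (out : Int) : Prop := out = check_alphabetical_order_alt input_string
instance (input_string : String) (out : Int) : Decidable (Spec_check_alphabetical_order input_string out) := by unfold Spec_check_alphabetical_order; infer_instance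

-- ===== CLAIM (what is proved, stated in full; the proofs are below) =====
def Claim_equal_check_alphabetical_order : Prop := ∀ (input_string : String), Dom_check_alphabetical_order input_string → Spec_check_alphabetical_order input_string (check_alphabetical_order input_string)

-- ===== LEMMAS AND PROOFS =====

-- joint loop invariant: in every reachable state (both programs return at the first
-- inversion) the running prefix max equals A's previous lowercase letter
theorem pvGoA_eq_scan (l : List Char) (m : Option Char) (n : Int) :
    pvGoA l m n = pvScanB l (pvPrefixMax l m) n := by
  induction l generalizing m n with
  | nil => rfl
  | cons c rest ih =>
    by_cases h : 'a' ≤ c ∧ c ≤ 'z'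
    · cases m with
      | none => simp [pvGoA, pvPrefixMax, pvScanB, h, ih]
      | some p =>
        by_cases hcp : c < p
        · simp [pvGoA, pvPrefixMax, pvScanB, h, hcp]
        · by_cases hpc : p < c
          · simp [pvGoA, pvPrefixMax, pvScanB, h, hcp, hpc, ih]
          · have : c = p := le_antisymm (not_lt.mp hpc) (not_lt.mp hcp)
            subst this
            simp [pvGoA, pvPrefixMax, pvScanB, h, ih]
    · cases m <;> simp [pvGoA, pvPrefixMax, pvScanB, h, ih]

-- ===== VERDICT (by name: the statement is the Claim_ definition above) =====
theorem check_alphabetical_order_spec : Claim_equal_check_alphabetical_order := by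
  intro s _
  unfold Spec_check_alphabetical_order check_alphabetical_order check_alphabetical_order_alt
  exact pvGoA_eq_scan s.toList none 0
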